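-- pv_equiv track=rewrite | github.com/xMeM/vulkan-wsi-layer | check_copyright.py | generate_years_string
-- ===== SOURCE A (Python) =====
-- from typing import List
--
-- def generate_years_string(years: List[int]) -> str:
--     """
--     Create a compacted string representation of a list of years.
--
--     E.g. [1991, 2001, 2002, 2003, 2006, 2007] becomes "1991, 2001-2003,
--     2006-2007"
--     """
--
--     generated_years_string = ""
--     if len(years) > 0:
--         y_mod_strings = ["%d" % years[0]]
--
--         last_element_was_incremental = False
--         for i in range(1, len(years)):
--             # Are we in an incremental sequence?
--             if years[i] == years[i - 1] + 1:
--
--                 last_element_was_incremental = True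
--
--                 # Are we at the last element?
--                 if i == len(years) - 1:
--                     y_mod_strings.append("-%d" % years[i])
--                 else:
--                     continue
--
--             else:
--                 # End of a sequence?
--                 if last_element_was_incremental:
--                     y_mod_strings.append("-%d, " % years[i - 1])
--                 else:
--                     y_mod_strings.append(", ")
--
--                 y_mod_strings.append("%d" % years[i])
--                 last_element_was_incremental = False
--
--         generated_years_string = "".join(y_mod_strings)
--
--     return generated_years_string
-- ===== SOURCE B (Python) =====
-- from typing import List
--
-- def generate_years_string(years: List[int]) -> str:
--     """Group years into maximal consecutive runs, format each run, join with ', '."""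
--     runs = []
--     for y in years:
--         if runs and y == runs[-1][1] + 1:
--             runs[-1] = (runs[-1][0], y)
--         else:
--             runs.append((y, y))
--     parts = ["%d" % s if s == e else "%d-%d" % (s, e) for s, e in runs]
--     return ", ".join(parts)
-- ===== Notes on version B (the rewrite author's own statement) =====
-- stated objective: simpler
-- what changed: Replaced the single stateful index loop with sentinel flag and piecewise string fragments ('-%d, ' etc.) by a group-then-format pipeline: one pass builds (start, end) runs, each run is formatted whole, and the parts are joined with ', '.
import Mathlib
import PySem

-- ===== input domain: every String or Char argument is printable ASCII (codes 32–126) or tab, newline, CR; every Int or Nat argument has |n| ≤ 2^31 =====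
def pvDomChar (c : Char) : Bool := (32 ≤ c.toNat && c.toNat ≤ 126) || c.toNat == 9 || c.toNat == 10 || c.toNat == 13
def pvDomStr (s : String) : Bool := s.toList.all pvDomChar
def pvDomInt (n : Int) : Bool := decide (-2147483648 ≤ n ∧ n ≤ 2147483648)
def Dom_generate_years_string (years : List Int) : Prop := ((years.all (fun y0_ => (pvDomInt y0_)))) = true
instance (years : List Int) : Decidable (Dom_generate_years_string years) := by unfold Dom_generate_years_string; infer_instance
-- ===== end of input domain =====

-- B replaces A's single stateful loop (sentinel flag, piecewise fragments) by a
-- group-into-runs-then-format-then-join pipeline; objective: simpler. Same O(n) cost.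

-- ===== PORT A =====
-- the loop over range(1, len(years)): rest = years[i:], prev = years[i-1],
-- strs = y_mod_strings, flag = last_element_was_incremental; r = [] ↔ i == len(years)-1
def pvALoop (rest : List Int) (prev : Int) (strs : List String) (flag : Bool) : List String :=
  match rest with
  | [] => strs
  | y :: r =>
    if y = prev + 1 then
      if r = [] then strs ++ ["-" ++ PySem.Int.toStr y]
      else pvALoop r y strs true
    else
      pvALoop r y
        (strs ++ (if flag then ["-" ++ PySem.Int.toStr prev ++ ", "] else [", "])
              ++ [PySem.Int.toStr y]) false

def generate_years_string (years : List Int) : String :=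
  match years with
  | [] => ""
  | y :: rest => PySem.Str.join "" (pvALoop rest y [PySem.Int.toStr y] false)

-- ===== PORT B =====
-- one step of the run-building loop: extend the last run or start a new one
def pvStep (runs : List (Int × Int)) (y : Int) : List (Int × Int) :=
  match runs.getLast? with
  | some (s, e) => if y = e + 1 then runs.dropLast ++ [(s, y)] else runs ++ [(y, y)]
  | none => runs ++ [(y, y)]

def pvFmt (r : Int × Int) : String :=
  if r.1 = r.2 then PySem.Int.toStr r.1
  else PySem.Int.toStr r.1 ++ "-" ++ PySem.Int.toStr r.2

def generate_years_string_alt (years : List Int) : String :=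
  PySem.Str.join ", " ((years.foldl pvStep []).map pvFmt)

-- ===== PRECONDITION & SPEC =====
def Spec_generate_years_string (years : List Int) (out : String) : Prop := out = generate_years_string_alt years
instance (years : List Int) (out : String) : Decidable (Spec_generate_years_string years out) := by unfold Spec_generate_years_string; infer_instance

-- ===== CLAIM (what is proved, stated in full; the proofs are below) =====
def Claim_equal_generate_years_string : Prop := ∀ (years : List Int), Dom_generate_years_string years → Spec_generate_years_string years (generate_years_string years)

-- ===== LEMMAS AND PROOFS =====

-- recursive form of B's run grouping: current run is (s, e)
def pvRunsGo (s e : Int) : List Int → List (Int × Int)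
  | [] => [(s, e)]
  | y :: ys => if y = e + 1 then pvRunsGo s y ys else (s, e) :: pvRunsGo y y ys

-- the characters A's loop emits after the first year, given prev = years[i-1] and the flag
def pvTailC (prev : Int) (flag : Bool) : List Int → List Char
  | [] => []
  | y :: r =>
    if y = prev + 1 then
      (if r = [] then '-' :: PySem.Int.toChars y else pvTailC y true r)
    else
      (if flag then '-' :: (PySem.Int.toChars prev ++ [',', ' ']) else [',', ' '])
        ++ PySem.Int.toChars y ++ pvTailC y false r

theorem pvJoinC_concat (l : List (List Char)) (x : List Char) :
    PySem.Chars.join [] (l ++ [x]) = PySem.Chars.join [] l ++ x := by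
  induction l with
  | nil => simp [PySem.Chars.join_nil, PySem.Chars.join_singleton]
  | cons p t ih =>
    cases t with
    | nil => simp [PySem.Chars.join_singleton, PySem.Chars.join_cons_cons]
    | cons q t' =>
      simp only [List.cons_append] at ih ⊢
      rw [PySem.Chars.join_cons_cons, PySem.Chars.join_cons_cons, ih]
      simp [List.append_assoc]

theorem pvJoinC_concat2 (l : List (List Char)) (a b : List Char) :
    PySem.Chars.join [] (l ++ [a, b]) = PySem.Chars.join [] l ++ a ++ b := by
  rw [show l ++ [a, b] = (l ++ [a]) ++ [b] from by simp, pvJoinC_concat, pvJoinC_concat]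

theorem pvDashToList : ("-" : String).toList = ['-'] := by decide

theorem pvSepToList : (", " : String).toList = [',', ' '] := by decide

theorem pvALoop_join (rest : List Int) (prev : Int) (strs : List String) (flag : Bool) :
    PySem.Chars.join [] ((pvALoop rest prev strs flag).map String.toList)
      = PySem.Chars.join [] (strs.map String.toList) ++ pvTailC prev flag rest := by
  induction rest generalizing prev strs flag with
  | nil => simp [pvALoop, pvTailC]
  | cons y r ih =>
    by_cases hy : y = prev + 1
    · by_cases hr : r = []
      · subst hr
        simp [pvALoop, pvTailC, hy, List.map_append, pvJoinC_concat,
              String.toList_append, PySem.Int.toList_toStr, pvDashToList]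
      · rw [show pvALoop (y :: r) prev strs flag = pvALoop r y strs true from by
          simp [pvALoop, hy, hr]]
        rw [ih]
        simp [pvTailC, hy, hr]
    · rw [show pvALoop (y :: r) prev strs flag
          = pvALoop r y (strs ++ (if flag then ["-" ++ PySem.Int.toStr prev ++ ", "] else [", "])
              ++ [PySem.Int.toStr y]) false from by simp [pvALoop, hy]]
      rw [ih]
      cases flag <;>
        simp [pvTailC, hy, List.map_append, pvJoinC_concat2, String.toList_append,
              PySem.Int.toList_toStr, pvSepToList, pvDashToList, List.append_assoc]

theorem pvFoldl_runs (ys : List Int) (acc : List (Int × Int)) (s e : Int) :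
    List.foldl pvStep (acc ++ [(s, e)]) ys = acc ++ pvRunsGo s e ys := by
  induction ys generalizing acc s e with
  | nil => simp [pvRunsGo]
  | cons y ys ih =>
    by_cases hy : y = e + 1
    · rw [List.foldl_cons, show pvStep (acc ++ [(s, e)]) y = acc ++ [(s, y)] from by
        simp [pvStep, hy], ih]
      simp [pvRunsGo, hy]
    · rw [List.foldl_cons, show pvStep (acc ++ [(s, e)]) y = (acc ++ [(s, e)]) ++ [(y, y)] from by
        simp [pvStep, hy], ih]
      simp [pvRunsGo, hy]

theorem pvRunsGo_ne_nil (s e : Int) (ys : List Int) : pvRunsGo s e ys ≠ [] := by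
  induction ys generalizing s e with
  | nil => simp [pvRunsGo]
  | cons y ys ih =>
    by_cases hy : y = e + 1
    · simpa [pvRunsGo, hy] using ih s y
    · simp [pvRunsGo, hy]

theorem pvKey (rest : List Int) (s prev : Int) (hle : s ≤ prev)
    (h : rest ≠ [] ∨ s = prev) :
    PySem.Chars.join [',', ' '] ((pvRunsGo s prev rest).map (fun r => (pvFmt r).toList))
      = PySem.Int.toChars s ++ pvTailC prev (if s = prev then false else true) rest := by
  induction rest generalizing s prev with
  | nil =>
    rcases h with h | h
    · exact absurd rfl h
    · subst h
      simp [pvRunsGo, PySem.Chars.join_singleton, pvFmt, pvTailC, PySem.Int.toList_toStr]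
  | cons y r ih =>
    by_cases hy : y = prev + 1
    · have hsy : s ≠ y := by omega
      rw [show pvRunsGo s prev (y :: r) = pvRunsGo s y r from by simp [pvRunsGo, hy]]
      by_cases hr : r = []
      · subst hr
        rw [show pvRunsGo s y [] = [(s, y)] from rfl]
        rw [show pvTailC prev (if s = prev then false else true) [y]
            = '-' :: PySem.Int.toChars y from by simp [pvTailC, hy]]
        simp [PySem.Chars.join_singleton, pvFmt, hsy, String.toList_append,
              PySem.Int.toList_toStr, pvDashToList]
      · rw [ih s y (by omega) (Or.inl hr)]
        rw [show pvTailC prev (if s = prev then false else true) (y :: r)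
            = pvTailC y true r from by simp [pvTailC, hy, hr]]
        rw [if_neg hsy]
    · rw [show pvRunsGo s prev (y :: r) = (s, prev) :: pvRunsGo y y r from by
        simp [pvRunsGo, hy]]
      obtain ⟨a, t, hat⟩ : ∃ a t, (pvRunsGo y y r).map (fun q => (pvFmt q).toList) = a :: t := by
        cases hq : pvRunsGo y y r with
        | nil => exact absurd hq (pvRunsGo_ne_nil y y r)
        | cons a t =>
            exact ⟨(pvFmt a).toList, t.map (fun q => (pvFmt q).toList), by simp⟩
      rw [List.map_cons, hat, PySem.Chars.join_cons_cons, ← hat]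
      rw [ih y y le_rfl (Or.inr rfl)]
      rw [show pvTailC prev (if s = prev then false else true) (y :: r)
          = (if (if s = prev then false else true)
              then '-' :: (PySem.Int.toChars prev ++ [',', ' ']) else [',', ' '])
            ++ PySem.Int.toChars y ++ pvTailC y false r from by simp [pvTailC, hy]]
      by_cases hsp : s = prev <;>
        simp [pvFmt, hsp, String.toList_append, PySem.Int.toList_toStr,
              pvDashToList, List.append_assoc]

-- ===== VERDICT (by name: the statement is the Claim_ definition above) =====
theorem generate_years_string_spec : Claim_equal_generate_years_string := by
  intro years _
  unfold Spec_generate_years_string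
  cases years with
  | nil => decide
  | cons y rest =>
    refine String.ext ?_
    rw [show generate_years_string (y :: rest)
        = PySem.Str.join "" (pvALoop rest y [PySem.Int.toStr y] false) from rfl]
    rw [show generate_years_string_alt (y :: rest)
        = PySem.Str.join ", " ((List.foldl pvStep ([] ++ [(y, y)]) rest).map pvFmt) from by
      simp [generate_years_string_alt, List.foldl_cons, pvStep]]
    rw [pvFoldl_runs, List.nil_append, PySem.Str.toList_join, PySem.Str.toList_join]
    rw [show ("" : String).toList = [] from rfl, pvSepToList, List.map_map]
    rw [pvALoop_join]
    have hkey := pvKey rest y y le_rfl (Or.inr rfl)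
    rw [if_pos rfl] at hkey
    rw [show (List.map (String.toList ∘ pvFmt) (pvRunsGo y y rest))
        = (pvRunsGo y y rest).map (fun q => (pvFmt q).toList) from by
      simp [Function.comp]]
    rw [hkey]
    simp [PySem.Chars.join_singleton, PySem.Int.toList_toStr]
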